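-- pv_equiv track=rewrite | github.com/SadmanTariq/BOTatoMaster69 | dadbot.py | prepare_response
-- ===== SOURCE A (Python) =====
-- starter_variations = ["i am ", "i'm ", "im ", "i m "]
--
-- def prepare_response(text):
--     text = text.lower()
--
--     for starter in starter_variations:
--         if text.startswith(starter):
--             response = text[len(starter):]  # Anything after starter to end.
--             response = "Hi, " + response
--             return response
--
--     return None
-- ===== SOURCE B (Python) =====
-- def prepare_response(text):
--     # Character-level decision tree on the shared prefixes instead of an
--     # ordered list of full-prefix checks.
--     t = text.lower()
--     head2 = t[:2]
--     if head2 == "i ":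
--         if t[2:5] == "am ":
--             return "Hi, " + t[5:]
--         if t[2:4] == "m ":
--             return "Hi, " + t[4:]
--     elif head2 == "i'":
--         if t[2:4] == "m ":
--             return "Hi, " + t[4:]
--     elif t[:3] == "im ":
--         return "Hi, " + t[3:]
--     return None
-- ===== Notes on version B (the rewrite author's own statement) =====
-- stated objective: alternative
-- what changed: Replaces the ordered loop over four full starter strings (each rescanned from position 0 via startswith) with a trie-like character decision tree that inspects the shared two-character prefix once and then branches on the distinguishing tail.
import Mathlib
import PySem

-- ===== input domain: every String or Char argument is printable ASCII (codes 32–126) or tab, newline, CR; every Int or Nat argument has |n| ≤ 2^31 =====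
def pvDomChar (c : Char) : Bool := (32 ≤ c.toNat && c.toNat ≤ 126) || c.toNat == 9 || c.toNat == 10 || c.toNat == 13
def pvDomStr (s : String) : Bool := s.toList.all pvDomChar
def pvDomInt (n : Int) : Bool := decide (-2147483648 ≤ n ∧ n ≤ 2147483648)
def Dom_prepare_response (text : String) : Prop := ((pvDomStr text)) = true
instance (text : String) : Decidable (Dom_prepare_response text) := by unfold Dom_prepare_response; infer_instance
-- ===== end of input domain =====

-- B replaces A's ordered loop over four full starter prefixes with a trie-like
-- character decision tree on the shared prefixes; alternative structure, same cost.


-- ===== PORT A =====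
def starter_variations : List String := ["i am ", "i'm ", "im ", "i m "]

-- the 'for starter in starter_variations' loop with its early return
def prLoopA (t : String) : List String → Option String
  | [] => none
  | starter :: rest =>
      if PySem.Str.startswith t starter then
        some ("Hi, " ++ PySem.Str.slice t (some (PySem.Str.len starter : Int)) none)
      else prLoopA t rest

def prepare_response (text : String) : Option String :=
  prLoopA (PySem.Str.lower text) starter_variations

-- ===== PORT B =====
def prepare_response_alt (text : String) : Option String :=
  let t := PySem.Str.lower text
  let head2 := PySem.Str.slice t none (some 2)
  if head2 == "i " then
    if PySem.Str.slice t (some 2) (some 5) == "am " then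
      some ("Hi, " ++ PySem.Str.slice t (some 5) none)
    else if PySem.Str.slice t (some 2) (some 4) == "m " then
      some ("Hi, " ++ PySem.Str.slice t (some 4) none)
    else none
  else if head2 == "i'" then
    if PySem.Str.slice t (some 2) (some 4) == "m " then
      some ("Hi, " ++ PySem.Str.slice t (some 4) none)
    else none
  else if PySem.Str.slice t none (some 3) == "im " then
    some ("Hi, " ++ PySem.Str.slice t (some 3) none)
  else none

-- ===== PRECONDITION & SPEC =====
def Spec_prepare_response (text : String) (out : Option String) : Prop := out = prepare_response_alt text
instance (text : String) (out : Option String) : Decidable (Spec_prepare_response text out) := by unfold Spec_prepare_response; infer_instance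

-- ===== CLAIM (what is proved, stated in full; the proofs are below) =====
def Claim_equal_prepare_response : Prop := ∀ (text : String), Dom_prepare_response text → Spec_prepare_response text (prepare_response text)

-- ===== LEMMAS AND PROOFS =====
theorem pv_ofList_eq_iff (l : List Char) (s : String) : String.ofList l = s ↔ l = s.toList :=
  ⟨fun h => by rw [← h, String.toList_ofList], fun h => by rw [h, String.ofList_toList]⟩

theorem pv_str_slice_eq_lit (t : String) (a b : Option Int) (lit : String) :
    (PySem.Str.slice t a b == lit) = (PySem.List.slice t.toList a b == lit.toList) := by
  simp only [PySem.Str.slice, PySem.Chars.slice_eq_listSlice]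
  rw [Bool.eq_iff_iff]
  simp [pv_ofList_eq_iff]

theorem pv_sw_eq (t p : String) :
    PySem.Str.startswith t p = p.toList.isPrefixOf t.toList := by
  simp [PySem.Chars.startswith]

theorem pv_main (text : String) : prepare_response text = prepare_response_alt text := by
  unfold prepare_response prepare_response_alt prLoopA starter_variations
  generalize PySem.Str.lower text = t
  simp only [prLoopA, pv_sw_eq, pv_str_slice_eq_lit]
  norm_num [PySem.Str.len, PySem.Chars.len,
    show ("i am " : String).length = 5 from by decide,
    show ("i'm " : String).length = 4 from by decide,
    show ("im " : String).length = 3 from by decide,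
    show ("i m " : String).length = 4 from by decide]
  generalize t.toList = l
  rcases l with _ | ⟨c0, _ | ⟨c1, _ | ⟨c2, _ | ⟨c3, _ | ⟨c4, l5⟩⟩⟩⟩⟩ <;>
    simp [PySem.List.slice, PySem.List.clampIdx] <;>
    · split_ifs <;> simp_all [@eq_comm Char]

-- ===== VERDICT (by name: the statement is the Claim_ definition above) =====
theorem prepare_response_spec : Claim_equal_prepare_response := by
  intro text _
  unfold Spec_prepare_response
  exact pv_main text
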